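-- pv_equiv track=rewrite | github.com/pstankiewicz/pi_by_hand | pi_by_hand.py | multiply_string_by_four
-- ===== SOURCE A (Python) =====
-- def multiply_string_by_four(a):
--     a = a[::-1]
--     result = ''
--     overflow = 0
--     for i in a:
--         if i == '.':
--             result += '.'
--             continue
--         r = int(i) * 4 + overflow
--         if r >= 10:
--             overflow = r // 10
--             r = r - overflow * 10
--         else:
--             overflow = 0
--         result += str(r)
--     return result[::-1] if overflow == 0 else str(overflow) + result[::-1]
-- ===== SOURCE B (Python) =====
-- def _weave(s, t):
--     # re-insert the digit characters of t into the dot pattern of s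
--     if not s:
--         return ''
--     if s[0] == '.':
--         return '.' + _weave(s[1:], t)
--     return t[0] + _weave(s[1:], t[1:])
--
--
-- def multiply_string_by_four(a):
--     # whole-number approach: read all the digits as one integer, multiply once,
--     # format back to the same number of digit positions, re-insert the dots
--     digits = [c for c in a if c != '.']
--     if digits:
--         n = 0
--         for c in digits:
--             n = n * 10 + int(c)
--         t = str(4 * n).zfill(len(digits))
--     else:
--         t = ''
--     k = len(t) - len(digits)
--     return t[:k] + _weave(a, t[k:])
-- ===== Notes on version B (the rewrite author's own statement) =====
-- stated objective: alternative
-- what changed: Replaces A's reversed per-digit multiply-and-carry loop by whole-number arithmetic: B strips the dots, reads the digits as one integer, multiplies it by 4 once, formats the product back with str().zfill() and re-inserts the dots at their original positions.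
import Mathlib
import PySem

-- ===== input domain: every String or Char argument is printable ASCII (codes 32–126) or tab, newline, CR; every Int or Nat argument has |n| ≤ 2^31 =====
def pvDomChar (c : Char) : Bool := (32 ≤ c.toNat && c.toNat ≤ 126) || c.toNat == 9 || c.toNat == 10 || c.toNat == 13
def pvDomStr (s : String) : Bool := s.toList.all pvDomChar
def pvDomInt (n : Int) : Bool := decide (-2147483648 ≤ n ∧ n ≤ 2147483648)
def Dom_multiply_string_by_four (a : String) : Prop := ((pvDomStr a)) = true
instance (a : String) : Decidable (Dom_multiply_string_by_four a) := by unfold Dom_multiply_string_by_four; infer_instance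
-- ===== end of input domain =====

-- B replaces A's per-digit multiply-and-carry loop by whole-number arithmetic: it reads all the
-- digits as one integer, multiplies once, formats back with zero-padding and re-inserts the dots
-- (alternative algorithm, same asymptotic cost).

-- ===== PORT A =====
-- one loop step of A: a dot is copied, a digit is multiplied by 4, carry handled by the r >= 10 branch
def mulAstep (st : List Char × Int) (c : Char) : List Char × Int :=
  if c = '.' then (st.1 ++ ['.'], st.2)
  else
    let r := ((c.toNat : Int) - 48) * 4 + st.2
    if r ≥ 10 then
      let ov := PySem.Int.floordiv r 10
      (st.1 ++ (PySem.Int.toChars (r - ov * 10)), ov)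
    else
      (st.1 ++ (PySem.Int.toChars r), 0)

def multiply_string_by_four (a : String) : String :=
  let rev := a.toList.reverse
  let st := rev.foldl mulAstep ([], 0)
  if st.2 = 0 then String.ofList st.1.reverse
  else String.ofList (PySem.Int.toChars st.2 ++ st.1.reverse)

-- ===== PORT B =====
-- Source B's _weave: replace the digit positions of s by the characters of t, keeping dots.
-- Python's t[0]/t[1:] on an empty t would raise; that state is unreachable from the caller
-- (t always holds exactly one character per non-dot character of s), so the [] branch is free.
def altWeave : List Char → List Char → List Char
  | [], _ => []
  | c :: s, t =>
    if c = '.' then '.' :: altWeave s t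
    else
      match t with
      | b :: bs => b :: altWeave s bs
      | [] => []

-- int(c) on a single character: (PySem.Int.ofChars? [c]).getD 0; the none case (ValueError on a
-- non-digit character) is excluded by Pre_, so the 0 default is never the result inside the claim.
def multiply_string_by_four_alt (a : String) : String :=
  let ds := a.toList.filter (fun c => c ≠ '.')
  let t : List Char :=
    if ds = [] then []
    else PySem.Chars.zfill
      (PySem.Int.toChars (4 * ds.foldl (fun (n : Int) c => n * 10 + (PySem.Int.ofChars? [c]).getD 0) 0))
      (ds.length : Int)
  let k : Int := (t.length : Int) - (ds.length : Int)
  String.ofList (PySem.List.slice t none (some k) ++ altWeave a.toList (PySem.List.slice t (some k) none))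

-- ===== PRECONDITION & SPEC =====
-- Pre_: every character is a decimal digit or a dot; on any other character A raises ValueError at int(i).
def Pre_multiply_string_by_four (a : String) : Prop :=
  (a.toList.all (fun c => c == '.' || (decide (48 ≤ c.toNat) && decide (c.toNat ≤ 57)))) = true
instance (a : String) : Decidable (Pre_multiply_string_by_four a) := by unfold Pre_multiply_string_by_four; infer_instance

def pvWitness_multiply_string_by_four : String := "3.14"

def Spec_multiply_string_by_four (a : String) (out : String) : Prop := out = multiply_string_by_four_alt a
instance (a : String) (out : String) : Decidable (Spec_multiply_string_by_four a out) := by unfold Spec_multiply_string_by_four; infer_instance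

-- ===== CLAIM (what is proved, stated in full; the proofs are below) =====
def Claim_equal_multiply_string_by_four : Prop := ∀ (a : String), Dom_multiply_string_by_four a → Pre_multiply_string_by_four a → Spec_multiply_string_by_four a (multiply_string_by_four a)

-- ===== LEMMAS AND PROOFS =====

-- digit value of a digit character
def nval (c : Char) : Nat := c.toNat - 48
-- number of digit characters of s
def Lnum (s : List Char) : Nat := (s.filter (fun c => c ≠ '.')).length
-- value of the digit characters of s read as one decimal number (dots skipped)
def Vd : List Char → Nat
  | [] => 0
  | c :: r => if c = '.' then Vd r else nval c * 10 ^ Lnum r + Vd r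

-- decimal digits of m, big-endian, as characters (normal form of Nat.toDigits 10)
def myDigits (m : Nat) : List Char :=
  if h : m < 10 then [Nat.digitChar m]
  else myDigits (m / 10) ++ [Nat.digitChar (m % 10)]
  decreasing_by exact Nat.div_lt_self (by omega) (by omega)

-- the low L digit characters of m, big-endian: positions 10^(L-1) .. 10^0
def bigR (m L : Nat) : List Char :=
  (List.range L).reverse.map (fun j => Nat.digitChar (m / 10 ^ j % 10))

-- A's accumulated output read big-endian: s with every digit replaced by the matching output digit
def Obig : List Char → List Char
  | [] => []
  | c :: r => (if c = '.' then '.' else Nat.digitChar (4 * Vd (c :: r) / 10 ^ Lnum r % 10)) :: Obig r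

-- the digit characters of Obig in order (what the weave consumes)
def obDigits : List Char → List Char
  | [] => []
  | c :: r => if c = '.' then obDigits r else Nat.digitChar (4 * Vd (c :: r) / 10 ^ Lnum r % 10) :: obDigits r


theorem toDigitsCore_eq (f : Nat) : ∀ (m : Nat) (acc : List Char), m < f →
    Nat.toDigitsCore 10 f m acc = myDigits m ++ acc := by
  induction f with
  | zero => intro m acc h; omega
  | succ f ih =>
    intro m acc h
    rw [Nat.toDigitsCore]
    by_cases h10 : m < 10
    · have : m / 10 = 0 := Nat.div_eq_of_lt h10
      simp [this, myDigits, h10, Nat.mod_eq_of_lt h10]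
    · have hne : m / 10 ≠ 0 := by omega
      have hlt : m / 10 < f := by
        have := Nat.div_lt_self (by omega : 0 < m) (by omega : 1 < 10)
        omega
      simp only [hne, if_neg, ih (m / 10) _ hlt]
      conv_rhs => rw [myDigits]
      simp [h10]

theorem toDigits_eq (m : Nat) : Nat.toDigits 10 m = myDigits m := by
  rw [Nat.toDigits, toDigitsCore_eq (m + 1) m [] (Nat.lt_succ_self m), List.append_nil]

theorem toChars_natCast (m : Nat) : PySem.Int.toChars (m : Int) = myDigits m := by
  simp [PySem.Int.toChars, toDigits_eq]

theorem toChars_small (v : Nat) (h : v < 10) : PySem.Int.toChars (v : Int) = [Nat.digitChar v] := by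
  rw [toChars_natCast, myDigits]; simp [h]

theorem digitChar_not_sign (d : Nat) (hd : d < 10) : Nat.digitChar d ≠ '+' ∧ Nat.digitChar d ≠ '-' := by
  interval_cases d <;> exact ⟨by decide, by decide⟩

theorem myDigits_ne_nil (m : Nat) : myDigits m ≠ [] := by
  rw [myDigits]; split_ifs <;> simp

theorem myDigits_head_not_sign (m : Nat) :
    ∀ c, (myDigits m).head? = some c → c ≠ '+' ∧ c ≠ '-' := by
  induction m using Nat.strong_induction_on with
  | _ m ih =>
    intro c hc
    rw [myDigits] at hc
    by_cases h10 : m < 10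
    · simp [h10] at hc
      exact hc ▸ digitChar_not_sign m h10
    · simp only [h10, dif_neg, not_false_iff] at hc
      rw [List.head?_append] at hc
      rcases Option.or_eq_some_iff.mp hc with h | ⟨h, _⟩
      · exact ih (m / 10) (Nat.div_lt_self (by omega) (by omega)) c h
      · exact absurd (List.head?_eq_none_iff.mp h) (myDigits_ne_nil (m / 10))

theorem zfillU (m : Nat) (w : Nat) :
    PySem.Chars.zfill (myDigits m) (w : Int) =
      List.replicate (w - (myDigits m).length) '0' ++ myDigits m := by
  rw [PySem.Chars.zfill.eq_def]
  by_cases hle : (w : Int) ≤ ((myDigits m).length : Int)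
  · have : w - (myDigits m).length = 0 := by omega
    simp [hle, this]
  · rw [if_neg hle]
    rcases hne : myDigits m with _ | ⟨c, rest⟩
    · exact absurd hne (myDigits_ne_nil m)
    · have hc := myDigits_head_not_sign m c (by rw [hne]; rfl)
      simp only []
      rw [if_neg (by tauto)]
      congr 2

theorem myDigits_len_le (L : Nat) : ∀ m, m < 10 ^ (L + 1) → (myDigits m).length ≤ L + 1 := by
  induction L with
  | zero => intro m h; rw [myDigits]; simp [show m < 10 by simpa using h]
  | succ L ih =>
    intro m h
    rw [myDigits]
    by_cases h10 : m < 10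
    · simp [h10]
    · rw [dif_neg h10]
      have : m / 10 < 10 ^ (L + 1) := by
        rw [Nat.div_lt_iff_lt_mul (by omega)]
        calc m < 10 ^ (L + 1 + 1) := h
        _ = 10 ^ (L + 1) * 10 := by ring
      simpa using ih (m / 10) this

theorem myDigits_len_ge (L : Nat) : ∀ m, 10 ^ L ≤ m → L + 1 ≤ (myDigits m).length := by
  induction L with
  | zero =>
    intro m _
    rw [myDigits]; split_ifs <;> simp
  | succ L ih =>
    intro m h
    have h10 : ¬ m < 10 := by
      have : 10 ≤ 10 ^ (L + 1) := by
        calc (10:Nat) = 10 ^ 1 := (pow_one 10).symm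
        _ ≤ 10 ^ (L + 1) := Nat.pow_le_pow_right (by omega) (by omega)
      omega
    rw [myDigits, dif_neg h10]
    have : 10 ^ L ≤ m / 10 := by
      rw [Nat.le_div_iff_mul_le (by omega)]
      calc 10 ^ L * 10 = 10 ^ (L + 1) := by ring
      _ ≤ m := h
    have := ih (m / 10) this
    simp; omega

theorem bigR_succ (m L : Nat) :
    bigR m (L + 1) = Nat.digitChar (m / 10 ^ L % 10) :: bigR m L := by
  simp [bigR, List.range_succ]

theorem zfill_split (L : Nat) : ∀ m : Nat,
    PySem.Chars.zfill (myDigits m) ((L + 1 : Nat) : Int) =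
      (if m / 10 ^ (L + 1) = 0 then [] else myDigits (m / 10 ^ (L + 1))) ++ bigR m (L + 1) := by
  induction L with
  | zero =>
    intro m
    rw [zfillU]
    by_cases h10 : m < 10
    · have hq : m / 10 ^ 1 = 0 := by rw [pow_one]; omega
      rw [hq, if_pos rfl]
      rw [myDigits]; simp [h10, bigR_succ, bigR, Nat.mod_eq_of_lt h10]
    · have hq : m / 10 ^ 1 ≠ 0 := by rw [pow_one]; omega
      rw [if_neg hq]
      have hlen : 2 ≤ (myDigits m).length := myDigits_len_ge 1 m (by simpa using h10)
      have : 1 - (myDigits m).length = 0 := by omega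
      rw [this]
      conv_lhs => rw [myDigits]
      rw [dif_neg h10]
      simp [bigR_succ, bigR, pow_one]
  | succ L ih =>
    intro m
    rw [zfillU, bigR_succ]
    set q := m / 10 ^ (L + 1) with hq
    have hql : m / 10 ^ (L + 1 + 1) = q / 10 := by
      rw [hq, Nat.div_div_eq_div_mul, ← pow_succ]
    by_cases hq0 : q = 0
    · have hm : m < 10 ^ (L + 1) := by
        rw [hq, Nat.div_eq_zero_iff] at hq0
        rcases hq0 with h | h
        · exact absurd h (by positivity)
        · exact h
      have hlen : (myDigits m).length ≤ L + 1 := myDigits_len_le L m hm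
      have hrep : L + 1 + 1 - (myDigits m).length = (L + 1 - (myDigits m).length) + 1 := by omega
      have ihm := ih m
      rw [zfillU] at ihm
      rw [hql, hq0, Nat.zero_div, if_pos rfl, List.nil_append,
        show (0 : Nat) % 10 = 0 from rfl,
        show Nat.digitChar 0 = '0' from rfl]
      rw [if_pos hq0, List.nil_append] at ihm
      rw [hrep, List.replicate_succ, List.cons_append, ihm]
    · have hm : 10 ^ (L + 1) ≤ m := by
        rw [hq] at hq0
        have := Nat.div_ne_zero_iff.mp hq0
        omega
      have hlen : L + 1 + 1 ≤ (myDigits m).length := myDigits_len_ge (L + 1) m hm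
      have ihm := ih m
      rw [zfillU, if_neg hq0] at ihm
      have hz1 : L + 1 - (myDigits m).length = 0 := by omega
      have hz2 : L + 1 + 1 - (myDigits m).length = 0 := by omega
      rw [hz1] at ihm
      simp only [List.replicate_zero, List.nil_append] at ihm
      rw [hql, hz2]
      simp only [List.replicate_zero, List.nil_append]
      rw [ihm]
      have hhead : (if q / 10 = 0 then [] else myDigits (q / 10)) ++ [Nat.digitChar (q % 10)] = myDigits q := by
        by_cases hq10 : q < 10
        · rw [if_pos (Nat.div_eq_of_lt hq10), List.nil_append, Nat.mod_eq_of_lt hq10]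
          rw [myDigits]; simp [hq10]
        · rw [if_neg (by omega)]
          conv_rhs => rw [myDigits]
          rw [dif_neg hq10]
      rw [← hhead]
      simp

theorem Lnum_cons_dot (r : List Char) : Lnum ('.' :: r) = Lnum r := by simp [Lnum]

theorem Lnum_cons_digit (c : Char) (r : List Char) (h : c ≠ '.') :
    Lnum (c :: r) = Lnum r + 1 := by simp [Lnum, h]

theorem div_pow_step (v w L : Nat) : (v * 10 ^ L + w) / 10 ^ L = v + w / 10 ^ L := by
  rw [Nat.add_comm, Nat.add_mul_div_right _ _ (by positivity : 0 < 10 ^ L), Nat.add_comm]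

theorem foldA (s : List Char)
    (hs : ∀ c ∈ s, c = '.' ∨ (48 ≤ c.toNat ∧ c.toNat ≤ 57)) :
    s.reverse.foldl mulAstep ([], 0) = ((Obig s).reverse, ((4 * Vd s / 10 ^ Lnum s : Nat) : Int)) := by
  induction s with
  | nil => simp [Obig, Vd, Lnum, mulAstep]
  | cons c r ih =>
    have ihr := ih (fun x hx => hs x (List.mem_cons_of_mem c hx))
    rw [List.reverse_cons, List.foldl_append, ihr, List.foldl_cons, List.foldl_nil]
    rcases hs c (List.mem_cons_self) with hdot | hdig
    · subst hdot
      simp only [mulAstep, if_pos rfl, Obig, Vd, Lnum_cons_dot]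
      simp
    · have hne : c ≠ '.' := by
        intro hcc; subst hcc; exact absurd hdig (by decide)
      set Lr := Lnum r with hLr
      set R : Nat := (nval c) * 4 + 4 * Vd r / 10 ^ Lr with hR
      have hcast : ((c.toNat : Int) - 48) = ((nval c : Nat) : Int) := by
        simp [nval]; omega
      have hstep : mulAstep ((Obig r).reverse, ((4 * Vd r / 10 ^ Lr : Nat) : Int)) c
          = ((Obig r).reverse ++ [Nat.digitChar (R % 10)], ((R / 10 : Nat) : Int)) := by
        rw [mulAstep, if_neg hne]
        simp only [hcast]
        have harg : ((nval c : Nat) : Int) * 4 + ((4 * Vd r / 10 ^ Lr : Nat) : Int) = ((R : Nat) : Int) := by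
          push_cast [hR]; ring
        rw [harg]
        by_cases h10 : (10 : Int) ≤ ((R : Nat) : Int)
        · rw [if_pos h10]
          rw [PySem.Int.floordiv_eq_ediv_of_pos (by norm_num)]
          have h1 : ((R : Nat) : Int) / 10 = ((R / 10 : Nat) : Int) := by
            omega
          have h2 : ((R : Nat) : Int) - ((R / 10 : Nat) : Int) * 10 = ((R % 10 : Nat) : Int) := by
            push_cast; omega
          rw [h1, h2, toChars_small (R % 10) (Nat.mod_lt _ (by omega))]
        · rw [if_neg h10]
          have hRlt : R < 10 := by omega
          have : R % 10 = R := Nat.mod_eq_of_lt hRlt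
          have hz : ((R / 10 : Nat) : Int) = 0 := by
            rw [Nat.div_eq_of_lt hRlt]; rfl
          rw [toChars_small R hRlt, this, hz]
      rw [hstep]
      have hVs : 4 * Vd (c :: r) = (4 * nval c) * 10 ^ Lr + 4 * Vd r := by
        simp [Vd, hne, ← hLr]; ring
      have hRd : 4 * Vd (c :: r) / 10 ^ Lr = R := by
        rw [hVs, div_pow_step, hR]; ring
      refine Prod.ext ?_ ?_
      · simp only [Obig, if_neg hne, List.reverse_cons, ← hLr, hRd]
      · show ((R / 10 : Nat) : Int) = ((4 * Vd (c :: r) / 10 ^ Lnum (c :: r) : Nat) : Int)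
        rw [Lnum_cons_digit c r hne, ← hLr, pow_succ, ← Nat.div_div_eq_div_mul, hRd]

theorem Lnum_dotless (ds : List Char) (hnd : ∀ c ∈ ds, c ≠ '.') : Lnum ds = ds.length := by
  unfold Lnum
  rw [List.filter_eq_self.mpr (by intro c hc; simpa using hnd c hc)]
theorem char_digit_cases (c : Char) (h48 : 48 ≤ c.toNat) (h57 : c.toNat ≤ 57) :
    c = '0' ∨ c = '1' ∨ c = '2' ∨ c = '3' ∨ c = '4' ∨ c = '5' ∨ c = '6' ∨ c = '7' ∨
      c = '8' ∨ c = '9' := by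
  have hv : c.toNat = 48 ∨ c.toNat = 49 ∨ c.toNat = 50 ∨ c.toNat = 51 ∨
      c.toNat = 52 ∨ c.toNat = 53 ∨ c.toNat = 54 ∨ c.toNat = 55 ∨
      c.toNat = 56 ∨ c.toNat = 57 := by omega
  have key : ∀ k : Nat, c.toNat = k → ∀ d : Char, d.toNat = k → c = d := by
    intro k hk d hd
    exact Char.ext (UInt32.toNat_inj.mp (by rw [show c.val.toNat = c.toNat from rfl, hk, show d.val.toNat = d.toNat from rfl, hd]))
  rcases hv with h|h|h|h|h|h|h|h|h|h
  · exact Or.inl (key _ h '0' rfl)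
  · exact Or.inr (Or.inl (key _ h '1' rfl))
  · exact Or.inr (Or.inr (Or.inl (key _ h '2' rfl)))
  · exact Or.inr (Or.inr (Or.inr (Or.inl (key _ h '3' rfl))))
  · exact Or.inr (Or.inr (Or.inr (Or.inr (Or.inl (key _ h '4' rfl)))))
  · exact Or.inr (Or.inr (Or.inr (Or.inr (Or.inr (Or.inl (key _ h '5' rfl))))))
  · exact Or.inr (Or.inr (Or.inr (Or.inr (Or.inr (Or.inr (Or.inl (key _ h '6' rfl)))))))
  · exact Or.inr (Or.inr (Or.inr (Or.inr (Or.inr (Or.inr (Or.inr (Or.inl (key _ h '7' rfl))))))))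
  · exact Or.inr (Or.inr (Or.inr (Or.inr (Or.inr (Or.inr (Or.inr (Or.inr (Or.inl (key _ h '8' rfl)))))))))
  · exact Or.inr (Or.inr (Or.inr (Or.inr (Or.inr (Or.inr (Or.inr (Or.inr (Or.inr (key _ h '9' rfl)))))))))

theorem ofChars_digit (c : Char) (h48 : 48 ≤ c.toNat) (h57 : c.toNat ≤ 57) :
    PySem.Int.ofChars? [c] = some ((c.toNat : Int) - 48) := by
  rcases char_digit_cases c h48 h57 with h|h|h|h|h|h|h|h|h|h <;> subst h <;> decide

theorem horner_aux (ds : List Char) (hd : ∀ c ∈ ds, 48 ≤ c.toNat ∧ c.toNat ≤ 57) :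
    ∀ iniN : Nat, ds.foldl (fun (n : Int) c => n * 10 + (PySem.Int.ofChars? [c]).getD 0) (iniN : Int)
      = ((iniN * 10 ^ ds.length + Vd ds : Nat) : Int) := by
  induction ds with
  | nil => intro iniN; simp [Vd]
  | cons c r ih =>
    intro iniN
    have hc := hd c (List.mem_cons_self)
    have hne : c ≠ '.' := by
      intro hcc; subst hcc; exact absurd hc (by decide)
    have hLr : Lnum r = r.length := Lnum_dotless r (fun x hx => by
      intro hxx; subst hxx; exact absurd (hd '.' (List.mem_cons_of_mem c hx)) (by decide))
    rw [List.foldl_cons]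
    have harg : (iniN : Int) * 10 + (PySem.Int.ofChars? [c]).getD 0 = ((iniN * 10 + nval c : Nat) : Int) := by
      rw [ofChars_digit c hc.1 hc.2]
      simp [nval]; omega
    rw [harg, ih (fun x hx => hd x (List.mem_cons_of_mem c hx)) (iniN * 10 + nval c)]
    congr 1
    show (iniN * 10 + nval c) * 10 ^ r.length + Vd r = iniN * 10 ^ (c :: r).length + Vd (c :: r)
    simp only [Vd, if_neg hne, hLr, List.length_cons]
    ring

theorem Lnum_filter (s : List Char) : Lnum (s.filter (fun c => c ≠ '.')) = Lnum s := by
  unfold Lnum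
  rw [List.filter_filter]
  simp

theorem Vd_filter (s : List Char) : Vd (s.filter (fun c => c ≠ '.')) = Vd s := by
  induction s with
  | nil => rfl
  | cons c r ih =>
    by_cases hc : c = '.'
    · subst hc; simpa [Vd] using ih
    · rw [List.filter_cons_of_pos (by simpa using hc)]
      simp only [Vd, if_neg hc, Lnum_filter, ih]

theorem highmod (a b L j : Nat) (h : j < L) :
    ((a * 10 ^ L + b) / 10 ^ j) % 10 = (b / 10 ^ j) % 10 := by
  have hL : 10 ^ L = (10 ^ (L - j - 1) * 10) * 10 ^ j := by
    rw [mul_assoc]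
    rw [← pow_succ']
    rw [← pow_add]
    congr 1
    omega
  rw [hL, ← mul_assoc, div_pow_step, Nat.add_comm]
  conv_lhs => rw [show a * (10 ^ (L - j - 1) * 10) = a * 10 ^ (L - j - 1) * 10 from by ring]
  rw [Nat.add_mul_mod_self_right]

theorem bigR_congr (m m' L : Nat) (h : ∀ j < L, m / 10 ^ j % 10 = m' / 10 ^ j % 10) :
    bigR m L = bigR m' L := by
  unfold bigR
  refine List.map_congr_left (fun j hj => ?_)
  rw [h j (by simpa using List.mem_range.mp (List.mem_reverse.mp hj))]

theorem obDigits_eq_bigR (s : List Char) : obDigits s = bigR (4 * Vd s) (Lnum s) := by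
  induction s with
  | nil => rfl
  | cons c r ih =>
    by_cases hc : c = '.'
    · subst hc
      simp only [obDigits, if_pos rfl, Vd, Lnum_cons_dot, ih]
      simp
    · simp only [obDigits, if_neg hc, Lnum_cons_digit c r hc, bigR_succ, ih]
      congr 1
      refine (bigR_congr _ _ _ (fun j hj => ?_)).symm
      have hVs : 4 * Vd (c :: r) = (4 * nval c) * 10 ^ Lnum r + 4 * Vd r := by
        simp only [Vd, if_neg hc]; ring
      rw [hVs, highmod _ _ _ _ hj]

theorem weave_obDigits (s : List Char) : altWeave s (obDigits s) = Obig s := by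
  induction s with
  | nil => rfl
  | cons c r ih =>
    by_cases hc : c = '.'
    · subst hc
      simp only [altWeave, obDigits, Obig]
      simp [ih]
    · simp only [altWeave, if_neg hc, obDigits, Obig, ih]

theorem final_assembly (a : String)
    (hpre : ∀ c ∈ a.toList, c = '.' ∨ (48 ≤ c.toNat ∧ c.toNat ≤ 57)) :
    multiply_string_by_four a = multiply_string_by_four_alt a := by
  unfold multiply_string_by_four multiply_string_by_four_alt
  dsimp only
  set s := a.toList with hsdef
  set ds := s.filter (fun c => c ≠ '.') with hds
  have hfold := foldA s hpre
  have hLds : ds.length = Lnum s := rfl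
  have hVds : Vd ds = Vd s := Vd_filter s
  set C : Nat := 4 * Vd s / 10 ^ Lnum s with hC
  rw [hfold]
  dsimp only
  by_cases hdsnil : ds = []
  · have hL0 : Lnum s = 0 := by rw [← hLds, hdsnil]; rfl
    have hV0 : Vd s = 0 := by rw [← hVds, hdsnil]; rfl
    have hC0 : C = 0 := by rw [hC, hV0, hL0]; rfl
    rw [if_pos (show ((C : Nat) : Int) = 0 by rw [hC0]; rfl)]
    have hob : obDigits s = [] := by
      rw [obDigits_eq_bigR, hL0]; rfl
    simp only [hdsnil, if_pos, List.length_nil]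
    norm_num
    rw [show altWeave s [] = Obig s from by rw [← hob]; exact weave_obDigits s]
    rw [PySem.List.slice_to ([] : List Char) (le_refl 0)]
    simp
  · rw [if_neg hdsnil]
    have hL1 : 1 ≤ Lnum s := by
      rw [← hLds]
      rcases ds with _ | ⟨x, xs⟩
      · exact absurd rfl hdsnil
      · simp
    have hdd : ∀ c ∈ ds, 48 ≤ c.toNat ∧ c.toNat ≤ 57 := by
      intro c hcm
      have hcs : c ∈ s := List.mem_of_mem_filter hcm
      rcases hpre c hcs with h | h
      · exact absurd h (by simpa using List.of_mem_filter hcm)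
      · exact h
    have hh := horner_aux ds hdd 0
    rw [show ((0 : Nat) : Int) = (0 : Int) from rfl] at hh
    rw [hh]
    have hval : (4 : Int) * ((0 * 10 ^ ds.length + Vd ds : Nat) : Int) = ((4 * Vd s : Nat) : Int) := by
      push_cast [hVds]; ring
    rw [hval, toChars_natCast (4 * Vd s)]
    have hLsplit : Lnum s = (Lnum s - 1) + 1 := by omega
    have hz := zfill_split (Lnum s - 1) (4 * Vd s)
    rw [← hLsplit] at hz
    rw [hLds, hz]
    set pref : List Char := if 4 * Vd s / 10 ^ Lnum s = 0 then [] else myDigits (4 * Vd s / 10 ^ Lnum s) with hpref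
    have hlen : ((pref ++ bigR (4 * Vd s) (Lnum s)).length : Int) - ((Lnum s : Nat) : Int) = (pref.length : Int) := by
      rw [List.length_append]
      rw [show (bigR (4 * Vd s) (Lnum s)).length = Lnum s from by simp [bigR]]
      push_cast
      ring
    rw [hlen]
    rw [PySem.List.slice_to _ (by positivity), PySem.List.slice_from _ (by positivity)]
    rw [Int.toNat_natCast]
    rw [List.take_left, List.drop_left]
    rw [← obDigits_eq_bigR, weave_obDigits]
    by_cases hCz : C = 0
    · rw [if_pos (by rw [hCz]; rfl)]
      rw [hpref, if_pos (by rw [← hC]; exact hCz)]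
      rw [List.nil_append, List.reverse_reverse]
    · rw [if_neg (by rw [← hC] at *; exact fun hh => hCz (by exact_mod_cast hh))]
      rw [hpref, if_neg (by rw [← hC]; exact hCz)]
      rw [toChars_natCast, List.reverse_reverse]

-- ===== VERDICT (by name: the statement is the Claim_ definition above) =====
theorem multiply_string_by_four_spec : Claim_equal_multiply_string_by_four := by
  intro a _ hpre
  unfold Pre_multiply_string_by_four at hpre
  simp only [List.all_eq_true, Bool.or_eq_true, Bool.and_eq_true, beq_iff_eq,
    decide_eq_true_eq] at hpre
  exact final_assembly a hpre
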